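-- pv_equiv track=rewrite | github.com/keiravillekode/factor-test-runner | bin/assemble_results.py | strip_noise
-- ===== SOURCE A (Python) =====
-- def strip_noise(s):
--     lines = []
--     for line in s.splitlines():
--         if line.startswith("fatal error for monitor root"):
--             continue
--         if line.startswith("(U) ["):
--             break
--         if not line.strip():
--             continue
--         lines.append(line)
--     return "\n".join(lines)
-- ===== SOURCE B (Python) =====
-- def strip_noise(s):
--     def go(lines):
--         if not lines:
--             return ""
--         head = lines[0]
--         if head.startswith("(U) ["):
--             return ""
--         rest = go(lines[1:])
--         if head.startswith("fatal error for monitor root") or not head.strip():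
--             return rest
--         return head if not rest else head + "\n" + rest
--     return go(s.splitlines())
-- ===== Notes on version B (the rewrite author's own statement) =====
-- stated objective: alternative
-- what changed: Replaced the iterative loop that accumulates kept lines in a list and joins them at the end by a structural recursion over the lines that assembles the joined output string directly on the way back up (no list, no join).
import Mathlib
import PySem

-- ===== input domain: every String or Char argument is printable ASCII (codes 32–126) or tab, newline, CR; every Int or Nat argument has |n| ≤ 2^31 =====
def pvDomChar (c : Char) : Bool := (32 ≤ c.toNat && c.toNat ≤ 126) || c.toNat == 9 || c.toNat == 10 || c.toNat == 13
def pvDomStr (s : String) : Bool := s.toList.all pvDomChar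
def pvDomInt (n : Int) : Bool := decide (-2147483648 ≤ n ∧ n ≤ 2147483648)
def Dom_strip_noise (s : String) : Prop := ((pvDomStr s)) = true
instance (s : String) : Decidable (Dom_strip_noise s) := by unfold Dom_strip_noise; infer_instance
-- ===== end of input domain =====

-- B replaces A's iterative filter-and-break loop with list accumulator plus final join by a
-- structural recursion over the lines that assembles the joined output string directly
-- (objective: alternative decomposition, same cost).

-- ===== PORT A =====
-- the for-loop with continue/break/append, as structural recursion over the remaining lines
-- with the accumulated `lines` list as state
def stripNoiseLoop (acc : List String) : List String → List String
  | [] => acc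
  | l :: ls =>
    if PySem.Str.startswith l "fatal error for monitor root" then stripNoiseLoop acc ls
    else if PySem.Str.startswith l "(U) [" then acc
    else if PySem.Str.strip l = "" then stripNoiseLoop acc ls
    else stripNoiseLoop (acc ++ [l]) ls

def strip_noise (s : String) : String :=
  PySem.Str.join "\n" (stripNoiseLoop [] (PySem.Str.splitlines s))

-- ===== PORT B =====
-- Source B's inner recursive `go`: builds the joined result string directly, no list, no join
def stripNoiseGo : List String → String
  | [] => ""
  | head :: rest_lines =>
    if PySem.Str.startswith head "(U) [" then ""
    else
      let rest := stripNoiseGo rest_lines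
      if PySem.Str.startswith head "fatal error for monitor root"
         || (PySem.Str.strip head == "") then rest
      else if rest == "" then head else head ++ "\n" ++ rest

def strip_noise_alt (s : String) : String :=
  stripNoiseGo (PySem.Str.splitlines s)

-- ===== PRECONDITION & SPEC =====
def Spec_strip_noise (s : String) (out : String) : Prop := out = strip_noise_alt s
instance (s : String) (out : String) : Decidable (Spec_strip_noise s out) := by unfold Spec_strip_noise; infer_instance

-- ===== CLAIM (what is proved, stated in full; the proofs are below) =====
def Claim_equal_strip_noise : Prop := ∀ (s : String), Dom_strip_noise s → Spec_strip_noise s (strip_noise s)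

-- ===== LEMMAS AND PROOFS =====

-- the common intermediate description: the filtered prefix of lines, as a list
def pvFilt (ls : List String) : List String :=
  (ls.takeWhile (fun line => !PySem.Str.startswith line "(U) [")).filter
    (fun line => !PySem.Str.startswith line "fatal error for monitor root"
                 && !(PySem.Str.strip line == ""))

-- a line cannot start with both markers (their first characters differ)
theorem not_both_markers (l : String) :
    PySem.Str.startswith l "fatal error for monitor root" = true →
    PySem.Str.startswith l "(U) [" = true → False := by
  intro h1 h2
  simp only [PySem.Str.startswith_eq] at h1 h2
  rw [PySem.Chars.startswith_iff] at h1 h2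
  rcases h1 with ⟨t1, e1⟩
  rcases h2 with ⟨t2, e2⟩
  rw [← e1] at e2
  simp at e2

theorem loop_eq (ls : List String) (acc : List String) :
    stripNoiseLoop acc ls = acc ++ pvFilt ls := by
  induction ls generalizing acc with
  | nil => simp [stripNoiseLoop, pvFilt]
  | cons l ls ih =>
    simp only [pvFilt, List.takeWhile, PySem.Str.startswith_eq]
    by_cases hu : PySem.Str.startswith l "(U) [" = true
    · have hf : PySem.Str.startswith l "fatal error for monitor root" = false := by
        by_contra h
        exact not_both_markers l
          (by revert h; cases PySem.Str.startswith l "fatal error for monitor root" <;> simp) hu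
      simp only [PySem.Str.startswith_eq] at hu hf
      simp at hu hf
      simp [stripNoiseLoop, hf, hu]
    · rw [Bool.not_eq_true] at hu
      by_cases hf : PySem.Str.startswith l "fatal error for monitor root" = true
      · simp only [PySem.Str.startswith_eq] at hu hf
        simp at hu hf
        simp [stripNoiseLoop, hf, hu, pvFilt] at ih ⊢
        exact ih acc
      · rw [Bool.not_eq_true] at hf
        by_cases hb : PySem.Str.strip l = "" <;>
        · simp only [PySem.Str.startswith_eq] at hu hf
          simp at hu hf
          simp [stripNoiseLoop, hf, hu, hb, pvFilt] at ih ⊢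
          simp [ih]

theorem strip_ne_empty (l : String) (h : ¬ (PySem.Str.strip l = "")) : l ≠ "" := by
  intro he; subst he; exact h (by decide)

theorem join_cons_ne_empty (x : String) (t : List String) (hx : x ≠ "") :
    PySem.Str.join "\n" (x :: t) ≠ "" := by
  intro h
  have hl : (PySem.Str.join "\n" (x :: t)).toList = ([] : List Char) := by
    rw [h]; rfl
  rw [PySem.Str.toList_join] at hl
  have hx' : x.toList ≠ [] := by
    intro hxl
    exact hx (String.toList_inj.mp (by simpa using hxl))
  cases t with
  | nil =>
    simp [PySem.Chars.join, List.intercalate] at hl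
    exact hx hl
  | cons y t' =>
    have : PySem.Chars.join "\n".toList (List.map String.toList (x :: y :: t'))
        = x.toList ++ "\n".toList ++ PySem.Chars.join "\n".toList (List.map String.toList (y :: t')) := by
      simp [PySem.Chars.join, List.intercalate]
    rw [this] at hl
    simp at hl

theorem join_cons_cons (x y : String) (t : List String) :
    PySem.Str.join "\n" (x :: y :: t) = x ++ "\n" ++ PySem.Str.join "\n" (y :: t) := by
  apply String.toList_inj.mp
  rw [PySem.Str.toList_join]
  simp only [String.toList_append, PySem.Str.toList_join]
  simp [PySem.Chars.join, List.intercalate]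

theorem join_singleton (x : String) : PySem.Str.join "\n" [x] = x := by
  apply String.toList_inj.mp
  rw [PySem.Str.toList_join]
  simp [PySem.Chars.join, List.intercalate]

theorem go_eq (ls : List String) : stripNoiseGo ls = PySem.Str.join "\n" (pvFilt ls) := by
  induction ls with
  | nil => rfl
  | cons l ls ih =>
    simp only [stripNoiseGo]
    by_cases hu : PySem.Str.startswith l "(U) [" = true
    · rw [if_pos hu]
      have hfilt : pvFilt (l :: ls) = [] := by
        simp only [pvFilt, List.takeWhile_cons, hu, Bool.not_true]
        simp
      rw [hfilt]; rfl
    · rw [Bool.not_eq_true] at hu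
      rw [if_neg (by simp only [hu]; exact Bool.false_ne_true)]
      by_cases hd : (PySem.Str.startswith l "fatal error for monitor root"
                     || (PySem.Str.strip l == "")) = true
      · rw [if_pos hd]
        have hpl : (!PySem.Str.startswith l "fatal error for monitor root"
                    && !(PySem.Str.strip l == "")) = false := by
          rcases Bool.or_eq_true_iff.mp hd with h | h
          · simp only [h, Bool.not_true, Bool.false_and]
          · simp only [h, Bool.not_true, Bool.and_false]
        have hfilt : pvFilt (l :: ls) = pvFilt ls := by
          simp only [pvFilt, List.takeWhile_cons, hu, Bool.not_false, if_pos, List.filter_cons,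
            hpl, Bool.false_eq_true, if_false]
        rw [hfilt, ih]
      · rw [if_neg hd]
        have h1 : PySem.Str.startswith l "fatal error for monitor root" = false := by
          cases hh : PySem.Str.startswith l "fatal error for monitor root"
          · rfl
          · exact absurd (by rw [Bool.or_eq_true_iff]; exact Or.inl hh) hd
        have h2 : (PySem.Str.strip l == "") = false := by
          cases hh : (PySem.Str.strip l == "")
          · rfl
          · exact absurd (by rw [Bool.or_eq_true_iff]; exact Or.inr hh) hd
        have hpl : (!PySem.Str.startswith l "fatal error for monitor root"
                    && !(PySem.Str.strip l == "")) = true := by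
          simp only [h1, h2, Bool.not_false, Bool.and_self]
        have hne : ¬ (PySem.Str.strip l = "") := by
          intro h
          rw [h] at h2
          simp at h2
        have hfilt : pvFilt (l :: ls) = l :: pvFilt ls := by
          simp only [pvFilt, List.takeWhile_cons, hu, Bool.not_false, if_true, List.filter_cons,
            hpl]
        rw [hfilt]
        cases hft : pvFilt ls with
        | nil =>
          have hrest : stripNoiseGo ls = "" := by rw [ih, hft]; rfl
          rw [if_pos (by rw [hrest]; rfl)]
          exact (join_singleton l).symm
        | cons x t =>
          have hxne : x ≠ "" := by
            have hxmem : x ∈ pvFilt ls := by rw [hft]; exact List.mem_cons_self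
            have hkeep := List.of_mem_filter hxmem
            rw [Bool.and_eq_true] at hkeep
            have hx2 : (PySem.Str.strip x == "") = false := (Bool.not_eq_true' (b := PySem.Str.strip x == "")).mp hkeep.2
            exact strip_ne_empty x (by intro h; rw [h] at hx2; simp at hx2)
          have hrest : stripNoiseGo ls ≠ "" := by
            rw [ih, hft]; exact join_cons_ne_empty x t hxne
          rw [if_neg (by simpa using hrest)]
          rw [ih, hft, join_cons_cons]

-- ===== VERDICT (by name: the statement is the Claim_ definition above) =====
theorem strip_noise_spec : Claim_equal_strip_noise := by
  intro s _
  unfold Spec_strip_noise strip_noise strip_noise_alt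
  rw [loop_eq, go_eq]
  simp
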